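-- pv_equiv track=rewrite | github.com/NexVolt-Solutions/Looks-Lab-Backend | app/services/workout_completion_service.py | _normalize_indices
-- ===== SOURCE A (Python) =====
-- def _normalize_indices(indices: list[int], total_exercises: int) -> list[int]:
--     normalized: list[int] = []
--     seen: set[int] = set()
--
--     for value in indices or []:
--         if not isinstance(value, int):
--             continue
--         if value < 0 or value >= total_exercises:
--             continue
--         if value in seen:
--             continue
--         seen.add(value)
--         normalized.append(value)
--
--     return sorted(normalized)
-- ===== SOURCE B (Python) =====
-- def _normalize_indices(indices: list[int], total_exercises: int) -> list[int]:
--     # Sort-then-scan: sort the eligible values first, then drop adjacent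
--     # duplicates in one pass (equal values are adjacent after sorting).
--     eligible = sorted(
--         v for v in (indices or [])
--         if isinstance(v, int) and 0 <= v < total_exercises
--     )
--     result = []
--     prev = None
--     for v in eligible:
--         if prev is None or v != prev:
--             result.append(v)
--             prev = v
--     return result
-- ===== Notes on version B (the rewrite author's own statement) =====
-- stated objective: alternative
-- what changed: Replaces A's seen-set + append loop followed by a final sort with a sort-first pipeline: filter the eligible values, sort them, then deduplicate adjacent equal values in a single scan with a 'prev' sentinel (no auxiliary set).
import Mathlib
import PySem

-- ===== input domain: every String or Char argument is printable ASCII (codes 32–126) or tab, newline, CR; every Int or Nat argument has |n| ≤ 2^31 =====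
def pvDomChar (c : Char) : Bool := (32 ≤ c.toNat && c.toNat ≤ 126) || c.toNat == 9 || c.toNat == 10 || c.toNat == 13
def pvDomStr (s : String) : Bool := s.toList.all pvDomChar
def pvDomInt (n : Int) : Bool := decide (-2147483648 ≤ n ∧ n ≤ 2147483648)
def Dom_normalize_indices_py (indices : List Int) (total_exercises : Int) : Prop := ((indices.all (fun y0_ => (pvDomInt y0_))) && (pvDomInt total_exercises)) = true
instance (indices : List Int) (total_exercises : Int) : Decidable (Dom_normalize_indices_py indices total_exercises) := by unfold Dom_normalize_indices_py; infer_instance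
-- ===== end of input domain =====

-- B replaces A's seen-set + append loop + final sort by filter → sort → one adjacent-dedup scan; same cost, different decomposition.


-- ===== PORT A =====
-- loop state: (normalized list, seen set); isinstance(value, int) is always true for List Int inputs
def normalize_indices_py (indices : List Int) (total_exercises : Int) : List Int :=
  let st := indices.foldl
    (fun (st : List Int × PySem.Set Int) value =>
      if value < 0 ∨ value ≥ total_exercises then st
      else if value ∈ st.2 then st
      else (st.1 ++ [value], PySem.Set.add st.2 value))
    ([], PySem.Set.empty)
  PySem.List.sorted st.1 (fun x => x) false

-- ===== PORT B =====
def normalize_indices_py_alt (indices : List Int) (total_exercises : Int) : List Int :=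
  let eligible := PySem.List.sorted
    (indices.filter (fun v => decide (0 ≤ v) && decide (v < total_exercises)))
    (fun x => x) false
  (eligible.foldl
    (fun (st : List Int × Option Int) v =>
      if st.2 = some v then st else (st.1 ++ [v], some v))
    ([], none)).1

-- ===== PRECONDITION & SPEC =====
def Spec_normalize_indices_py (indices : List Int) (total_exercises : Int) (out : List Int) : Prop := out = normalize_indices_py_alt indices total_exercises
instance (indices : List Int) (total_exercises : Int) (out : List Int) : Decidable (Spec_normalize_indices_py indices total_exercises out) := by unfold Spec_normalize_indices_py; infer_instance

-- ===== CLAIM (what is proved, stated in full; the proofs are below) =====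
def Claim_equal_normalize_indices_py : Prop := ∀ (indices : List Int) (total_exercises : Int), Dom_normalize_indices_py indices total_exercises → Spec_normalize_indices_py indices total_exercises (normalize_indices_py indices total_exercises)

-- ===== LEMMAS AND PROOFS =====

-- A's loop invariant: the accumulator stays nodup, seen tracks exactly its members,
-- and the final members are the old ones plus the in-range values of the remaining input.
theorem afold_inv (t : Int) (indices : List Int) :
    ∀ (acc : List Int) (seen : PySem.Set Int),
    acc.Nodup → (∀ x, x ∈ seen ↔ x ∈ acc) →
    let r := indices.foldl
      (fun (st : List Int × PySem.Set Int) value =>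
        if value < 0 ∨ value ≥ t then st
        else if value ∈ st.2 then st
        else (st.1 ++ [value], PySem.Set.add st.2 value)) (acc, seen)
    r.1.Nodup ∧ (∀ x, x ∈ r.1 ↔ x ∈ acc ∨ (x ∈ indices ∧ 0 ≤ x ∧ x < t)) := by
  induction indices with
  | nil => intro acc seen hnd hseen; exact ⟨hnd, by simp⟩
  | cons v rest ih =>
    intro acc seen hnd hseen
    simp only [List.foldl_cons]
    by_cases hr : v < 0 ∨ v ≥ t
    · rw [if_pos hr]
      obtain ⟨h1, h2⟩ := ih acc seen hnd hseen
      refine ⟨h1, fun x => ?_⟩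
      rw [h2]
      constructor
      · rintro (h | h) <;> simp_all
      · rintro (h | ⟨hm, h0, hlt⟩)
        · exact Or.inl h
        · rcases List.mem_cons.mp hm with rfl | hm'
          · omega
          · exact Or.inr ⟨hm', h0, hlt⟩
    · rw [if_neg hr]
      push Not at hr
      by_cases hv : v ∈ seen
      · rw [if_pos hv]
        obtain ⟨h1, h2⟩ := ih acc seen hnd hseen
        refine ⟨h1, fun x => ?_⟩
        rw [h2]
        have hva : v ∈ acc := (hseen v).mp hv
        constructor
        · rintro (h | h) <;> simp_all
        · rintro (h | ⟨hm, h0, hlt⟩)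
          · exact Or.inl h
          · rcases List.mem_cons.mp hm with rfl | hm'
            · exact Or.inl hva
            · exact Or.inr ⟨hm', h0, hlt⟩
      · rw [if_neg hv]
        have hva : v ∉ acc := fun h => hv ((hseen v).mpr h)
        have hnd' : (acc ++ [v]).Nodup := by
          rw [List.nodup_append]
          refine ⟨hnd, List.nodup_singleton _, ?_⟩
          intro a ha b hb
          simp only [List.mem_singleton] at hb
          subst hb
          exact fun h => hva (h ▸ ha)
        have hseen' : ∀ x, x ∈ PySem.Set.add seen v ↔ x ∈ acc ++ [v] := by
          intro x; rw [PySem.Set.mem_add]; simp [hseen x]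
        obtain ⟨h1, h2⟩ := ih (acc ++ [v]) (PySem.Set.add seen v) hnd' hseen'
        refine ⟨h1, fun x => ?_⟩
        rw [h2]
        constructor
        · rintro (h | h)
          · rcases List.mem_append.mp h with h' | h'
            · exact Or.inl h'
            · simp only [List.mem_singleton] at h'
              subst h'
              exact Or.inr ⟨List.mem_cons_self, by omega⟩
          · exact Or.inr ⟨List.mem_cons_of_mem _ h.1, h.2⟩
        · rintro (h | ⟨hm, h0, hlt⟩)
          · exact Or.inl (List.mem_append.mpr (Or.inl h))
          · rcases List.mem_cons.mp hm with rfl | hm'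
            · exact Or.inl (by simp)
            · exact Or.inr ⟨hm', h0, hlt⟩

-- B's scan invariant on a ≤-sorted remainder: given prev = p with p ∈ acc, acc strictly
-- increasing, all of acc ≤ p ≤ everything left, the scan keeps acc strictly increasing and
-- its members are old members plus the remainder's members.
theorem bfold_inv (s : List Int) :
    ∀ (acc : List Int) (p : Int),
    s.Pairwise (· ≤ ·) → (∀ x ∈ s, p ≤ x) →
    acc.Pairwise (· < ·) → (∀ a ∈ acc, a ≤ p) → p ∈ acc →
    let r := s.foldl
      (fun (st : List Int × Option Int) v =>
        if st.2 = some v then st else (st.1 ++ [v], some v)) (acc, some p)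
    r.1.Pairwise (· < ·) ∧ (∀ x, x ∈ r.1 ↔ x ∈ acc ∨ x ∈ s) := by
  induction s with
  | nil => intro acc p _ _ hpw _ _; exact ⟨hpw, by simp⟩
  | cons v rest ih =>
    intro acc p hs hpl hpw hle hpm
    have hrest : rest.Pairwise (· ≤ ·) := (List.pairwise_cons.mp hs).2
    have hvle : ∀ x ∈ rest, v ≤ x := (List.pairwise_cons.mp hs).1
    have hpv : p ≤ v := hpl v List.mem_cons_self
    simp only [List.foldl_cons]
    by_cases hpe : (some p : Option Int) = some v
    · rw [if_pos hpe]
      have hvp : v = p := (Option.some_inj.mp hpe).symm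
      obtain ⟨h1, h2⟩ := ih acc p hrest (fun x hx => le_trans hpv (hvle x hx)) hpw hle hpm
      refine ⟨h1, fun x => ?_⟩
      rw [h2]
      constructor
      · rintro (h | h) <;> simp_all
      · rintro (h | h)
        · exact Or.inl h
        · rcases List.mem_cons.mp h with rfl | h'
          · exact Or.inl (hvp ▸ hpm)
          · exact Or.inr h'
    · rw [if_neg hpe]
      have hplt : p < v := lt_of_le_of_ne hpv (fun h => hpe (by rw [h]))
      obtain ⟨h1, h2⟩ := ih (acc ++ [v]) v hrest hvle
        (by
          rw [List.pairwise_append]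
          exact ⟨hpw, List.pairwise_singleton _ _,
            fun a ha b hb => by
              simp only [List.mem_singleton] at hb
              subst hb
              exact lt_of_le_of_lt (hle a ha) hplt⟩)
        (by
          intro a ha
          rcases List.mem_append.mp ha with h' | h'
          · exact le_of_lt (lt_of_le_of_lt (hle a h') hplt)
          · simp only [List.mem_singleton] at h'; omega)
        (by simp)
      refine ⟨h1, fun x => ?_⟩
      rw [h2]
      constructor
      · rintro (h | h)
        · rcases List.mem_append.mp h with h' | h'
          · exact Or.inl h'
          · simp only [List.mem_singleton] at h'
            exact Or.inr (h' ▸ List.mem_cons_self)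
        · exact Or.inr (List.mem_cons_of_mem _ h)
      · rintro (h | h)
        · exact Or.inl (List.mem_append.mpr (Or.inl h))
        · rcases List.mem_cons.mp h with rfl | h'
          · exact Or.inl (by simp)
          · exact Or.inr h'

-- ===== VERDICT (by name: the statement is the Claim_ definition above) =====
theorem normalize_indices_py_spec : Claim_equal_normalize_indices_py := by
  intro indices t _
  unfold Spec_normalize_indices_py normalize_indices_py normalize_indices_py_alt
  simp only []
  -- names
  set F := indices.filter (fun v => decide (0 ≤ v) && decide (v < t)) with hF
  set s := PySem.List.sorted F (fun x => x) false with hs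
  have hsperm : s.Perm F := PySem.List.sorted_perm F (fun x => x) false
  have hsorted : s.Pairwise (· ≤ ·) := by
    have := PySem.List.sorted_pairwise (xs := F) (key := fun x => x)
    simpa using this
  -- A's accumulator
  obtain ⟨hnd, hmem⟩ := afold_inv t indices [] PySem.Set.empty List.nodup_nil
    (by intro x; simp [PySem.Set.empty])
  set norm := (indices.foldl
      (fun (st : List Int × PySem.Set Int) value =>
        if value < 0 ∨ value ≥ t then st
        else if value ∈ st.2 then st
        else (st.1 ++ [value], PySem.Set.add st.2 value)) ([], PySem.Set.empty)).1 with hnorm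
  -- B's result
  rcases hslist : s with _ | ⟨v, rest⟩
  · -- s = [], so F = [] and norm has no members
    have hFnil : F = [] := by rw [hslist] at hsperm; exact hsperm.symm.eq_nil
    have : norm = [] := by
      apply List.eq_nil_iff_forall_not_mem.mpr
      intro x hx
      rcases (hmem x).mp hx with h | ⟨hi, h0, hlt⟩
      · simp at h
      · have : x ∈ F := by
          rw [hF]; exact List.mem_filter.mpr ⟨hi, by simp [h0, hlt]⟩
        rw [hFnil] at this; simp at this
    simp [this, PySem.List.sorted]
  · -- s = v :: rest
    have hrest : rest.Pairwise (· ≤ ·) := by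
      rw [hslist] at hsorted; exact (List.pairwise_cons.mp hsorted).2
    have hvle : ∀ x ∈ rest, v ≤ x := by
      rw [hslist] at hsorted; exact (List.pairwise_cons.mp hsorted).1
    obtain ⟨hbpw, hbmem⟩ := bfold_inv rest [v] v hrest hvle
      (List.pairwise_singleton _ _) (by simp) (by simp)
    simp only [List.foldl_cons, if_neg (by simp : ¬ ((none : Option Int) = some v)),
      List.nil_append]
    -- goal: sorted norm = fold result
    set B := (rest.foldl
      (fun (st : List Int × Option Int) v =>
        if st.2 = some v then st else (st.1 ++ [v], some v)) ([v], some v)).1 with hB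
    have hBnodup : B.Nodup := hbpw.imp (fun h => ne_of_lt h)
    have hmemEq : ∀ x, x ∈ B ↔ x ∈ norm := by
      intro x
      rw [hbmem x, hmem x]
      have hxs : (x ∈ [v] ∨ x ∈ rest) ↔ x ∈ s := by rw [hslist]; simp
      rw [hxs]
      have : x ∈ s ↔ x ∈ F := hsperm.mem_iff
      rw [this, hF, List.mem_filter]
      constructor
      · rintro ⟨hi, hc⟩
        simp only [Bool.and_eq_true, decide_eq_true_eq] at hc
        exact Or.inr ⟨hi, hc.1, hc.2⟩
      · rintro (h | ⟨hi, h0, hlt⟩)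
        · simp at h
        · exact ⟨hi, by simp [h0, hlt]⟩
    have hperm : B.Perm norm := (List.perm_ext_iff_of_nodup hBnodup hnd).mpr hmemEq
    exact PySem.List.sorted_eq_of_perm_of_pairwise_lt norm B (fun x => x) hperm (by simpa using hbpw)
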